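-- pv_equiv track=rewrite | github.com/jessieyz/Python_Tutorial | english_class_seating_chart.py | seat_order_score
-- ===== SOURCE A (Python) =====
-- def seat_order_score(students_at_table, genders):
--     score = 0
--     for index in range(1, len(students_at_table)):
--         previous_gender = genders[students_at_table[index - 1]]
--         current_gender = genders[students_at_table[index]]
--         if "non-binary" in {previous_gender, current_gender}:
--             continue
--         if previous_gender == current_gender:
--             score += 1
--     return score
-- ===== SOURCE B (Python) =====
-- def seat_order_score(students_at_table, genders):
--     if len(students_at_table) < 2:
--         return 0
--     gs = [genders[s] for s in students_at_table]
--     score = 0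
--     n = len(gs)
--     i = 0
--     while i < n:
--         j = i
--         while j < n and gs[j] == gs[i]:
--             j += 1
--         if gs[i] != "non-binary":
--             score += (j - i) - 1
--         i = j
--     return score
-- ===== Notes on version B (the rewrite author's own statement) =====
-- stated objective: alternative
-- what changed: B first materialises the seated students' gender list, then counts same-gender adjacent pairs by run-length accounting with a two-pointer scan over maximal equal-gender runs (adding L-1 per non-'non-binary' run), instead of A's per-index inspection of each adjacent pair with two dict lookups per step.
import Mathlib
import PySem

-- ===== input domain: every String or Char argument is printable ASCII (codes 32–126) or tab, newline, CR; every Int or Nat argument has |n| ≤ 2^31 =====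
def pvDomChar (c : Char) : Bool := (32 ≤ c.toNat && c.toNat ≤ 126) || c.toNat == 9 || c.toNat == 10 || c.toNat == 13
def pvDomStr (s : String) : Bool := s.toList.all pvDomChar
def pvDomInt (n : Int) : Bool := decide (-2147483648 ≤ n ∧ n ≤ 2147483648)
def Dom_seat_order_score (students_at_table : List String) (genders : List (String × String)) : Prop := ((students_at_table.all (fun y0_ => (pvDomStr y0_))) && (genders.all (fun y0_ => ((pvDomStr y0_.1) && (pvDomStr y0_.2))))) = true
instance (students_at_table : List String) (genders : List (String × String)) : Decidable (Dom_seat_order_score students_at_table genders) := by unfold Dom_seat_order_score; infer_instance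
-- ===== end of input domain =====

-- B counts same-gender adjacent pairs by run-length accounting over the materialised gender
-- list (two-pointer scan over maximal runs, adding L-1 per non-'non-binary' run) instead of
-- A's per-index adjacent-pair inspection; same O(n) cost (objective: alternative).

-- genders[name]: Python dict lookup; default "" is only reached outside Pre_ (Python raises KeyError there)
def pvLookup (genders : List (String × String)) (name : String) : String :=
  PySem.Dict.getD (PySem.Dict.ofList genders) name ""

-- ===== PORT A =====
def seat_order_score (students_at_table : List String) (genders : List (String × String)) : Int :=
  (PySem.List.pyRange 1 (PySem.List.len students_at_table) 1).foldl
    (fun score index =>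
      let previous_gender := pvLookup genders (PySem.List.pyGetD students_at_table (index - 1) "")
      let current_gender := pvLookup genders (PySem.List.pyGetD students_at_table index "")
      if previous_gender = "non-binary" ∨ current_gender = "non-binary" then score
      else if previous_gender = current_gender then score + 1 else score)
    0

-- ===== PORT B =====
-- inner while loop of B: advance j while j < n and gs[j] == gs[i] (gi = gs[i]);
-- fuel (= remaining distance to n at entry) only makes the recursion structural
def pvInner (gs : List String) (n : Nat) (gi : String) : Nat → Nat → Nat
  | 0, j => j
  | fuel + 1, j => if j < n ∧ gs.getD j "" = gi then pvInner gs n gi fuel (j + 1) else j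

-- outer while loop of B over run starts; fuel likewise only makes it structural
def pvOuter (gs : List String) (n : Nat) : Nat → Nat → Int → Int
  | 0, _, score => score
  | fuel + 1, i, score =>
    if i < n then
      let j := pvInner gs n (gs.getD i "") (n - i) i
      let score' := if gs.getD i "" ≠ "non-binary" then score + ((j : Int) - (i : Int) - 1) else score
      pvOuter gs n fuel j score'
    else score

def seat_order_score_alt (students_at_table : List String) (genders : List (String × String)) : Int :=
  if PySem.List.len students_at_table < 2 then 0
  else
    let gs := students_at_table.map (fun s => pvLookup genders s)
    pvOuter gs gs.length gs.length 0 0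

-- ===== PRECONDITION & SPEC =====
-- Pre_: exactly the inputs where Python A returns: either fewer than two students (the loop
-- never runs, no lookup happens) or every seated student is a key of genders (else KeyError).
def Pre_seat_order_score (students_at_table : List String) (genders : List (String × String)) : Prop :=
  students_at_table.length < 2 ∨ ∀ s ∈ students_at_table, s ∈ genders.map Prod.fst
instance (students_at_table : List String) (genders : List (String × String)) : Decidable (Pre_seat_order_score students_at_table genders) := by unfold Pre_seat_order_score; infer_instance

def pvWitness_seat_order_score : List String × (List (String × String)) :=
  (["ann", "bob", "cal"], [("ann", "f"), ("bob", "f"), ("cal", "non-binary")])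

def Spec_seat_order_score (students_at_table : List String) (genders : List (String × String)) (out : Int) : Prop := out = seat_order_score_alt students_at_table genders
instance (students_at_table : List String) (genders : List (String × String)) (out : Int) : Decidable (Spec_seat_order_score students_at_table genders out) := by unfold Spec_seat_order_score; infer_instance

-- ===== CLAIM (what is proved, stated in full; the proofs are below) =====
def Claim_equal_seat_order_score : Prop := ∀ (students_at_table : List String) (genders : List (String × String)), Dom_seat_order_score students_at_table genders → Pre_seat_order_score students_at_table genders → Spec_seat_order_score students_at_table genders (seat_order_score students_at_table genders)

-- ===== LEMMAS AND PROOFS =====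

-- contribution of one adjacent pair, and the total over all adjacent pairs (reference value)
def pvContrib (a b : String) : Int :=
  if a = "non-binary" ∨ b = "non-binary" then 0 else if a = b then 1 else 0

def pvPairScore : List String → Int
  | [] => 0
  | [_] => 0
  | a :: b :: t => pvContrib a b + pvPairScore (b :: t)

theorem pvPairScore_append (a : String) (ys : List String) (x : String) :
    pvPairScore ((a :: ys) ++ [x]) = pvPairScore (a :: ys) + pvContrib (ys.getLastD a) x := by
  induction ys generalizing a with
  | nil => simp [pvPairScore]
  | cons b t ih =>
    simp only [List.cons_append, pvPairScore, List.getLastD_cons]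
    rw [← List.cons_append, ih b]
    ring

theorem pv_getD_last (a : String) (ys : List String) (x d : String) :
    ((a :: ys) ++ [x]).getD ys.length d = ys.getLastD a := by
  induction ys generalizing a with
  | nil => simp
  | cons b t ih =>
    rw [List.getLastD_cons]
    simpa using ih b

-- A's loop over indices 1..len-1 computes the adjacent-pair total
theorem pvLoopA (gs : List String) (d : String) (acc : Int) :
    (PySem.List.pyRange 1 (gs.length : Int) 1).foldl
      (fun score i =>
        let p := PySem.List.pyGetD gs (i - 1) d
        let c := PySem.List.pyGetD gs i d
        if p = "non-binary" ∨ c = "non-binary" then score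
        else if p = c then score + 1 else score)
      acc = acc + pvPairScore gs := by
  induction gs using List.reverseRecOn generalizing acc with
  | nil => simp [PySem.List.pyRange_one_eq_nil, pvPairScore]
  | append_singleton ys x ih =>
    cases ys with
    | nil =>
      simp [PySem.List.pyRange_one_eq_nil, pvPairScore]
    | cons a zs =>
      have hlen : (((a :: zs) ++ [x]).length : Int) = ((a :: zs).length : Int) + 1 := by
        simp
      rw [hlen, PySem.List.pyRange_one_succ_right (by exact_mod_cast Nat.succ_le_succ (Nat.zero_le _)),
          List.foldl_append]
      have hcongr :
          (PySem.List.pyRange 1 ((a :: zs).length : Int) 1).foldl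
            (fun score i =>
              let p := PySem.List.pyGetD ((a :: zs) ++ [x]) (i - 1) d
              let c := PySem.List.pyGetD ((a :: zs) ++ [x]) i d
              if p = "non-binary" ∨ c = "non-binary" then score
              else if p = c then score + 1 else score) acc
          = (PySem.List.pyRange 1 ((a :: zs).length : Int) 1).foldl
            (fun score i =>
              let p := PySem.List.pyGetD (a :: zs) (i - 1) d
              let c := PySem.List.pyGetD (a :: zs) i d
              if p = "non-binary" ∨ c = "non-binary" then score
              else if p = c then score + 1 else score) acc := by
        apply PySem.List.foldl_congr_mem
        intro acc' i hi
        rw [PySem.List.mem_pyRange_one] at hi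
        have h1 : PySem.List.pyGetD ((a :: zs) ++ [x]) (i - 1) d
            = PySem.List.pyGetD (a :: zs) (i - 1) d := by
          rw [PySem.List.pyGetD_eq_getElem ((a :: zs) ++ [x]) d (by simp at hi ⊢; omega) (by simp at hi ⊢; omega),
              PySem.List.pyGetD_eq_getElem (a :: zs) d (by simp at hi ⊢; omega) (by simp at hi ⊢; omega)]
          rw [List.getElem_append_left]
        have h2 : PySem.List.pyGetD ((a :: zs) ++ [x]) i d
            = PySem.List.pyGetD (a :: zs) i d := by
          rw [PySem.List.pyGetD_eq_getElem ((a :: zs) ++ [x]) d (by simp at hi ⊢; omega) (by simp at hi ⊢; omega),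
              PySem.List.pyGetD_eq_getElem (a :: zs) d (by simp at hi ⊢; omega) (by simp at hi ⊢; omega)]
          rw [List.getElem_append_left]
        simp only [h1, h2]
      rw [hcongr, ih]
      -- final iteration at index (a :: zs).length
      have hp : PySem.List.pyGetD ((a :: zs) ++ [x]) (((a :: zs).length : Int) - 1) d
          = zs.getLastD a := by
        have : (((a :: zs).length : Int) - 1) = (zs.length : Int) := by simp
        rw [this, PySem.List.pyGetD_natCast]
        exact pv_getD_last a zs x d
      have hc : PySem.List.pyGetD ((a :: zs) ++ [x]) ((a :: zs).length : Int) d = x := by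
        rw [PySem.List.pyGetD_natCast]
        simp
      simp only [List.foldl_cons, List.foldl_nil, hp, hc]
      rw [pvPairScore_append a zs x]
      unfold pvContrib
      split_ifs <;> ring
  
-- inner while loop = skip the maximal prefix of elements equal to gi (fuel adequate)
theorem pvInner_spec (gs : List String) (gi : String) (fuel j : Nat)
    (hf : gs.length - j ≤ fuel) :
    pvInner gs gs.length gi fuel j
      = j + ((gs.drop j).takeWhile (fun x => x = gi)).length := by
  induction fuel generalizing j with
  | zero =>
    have hj : gs.length ≤ j := by omega
    simp [pvInner, List.drop_eq_nil_of_le hj]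
  | succ fuel ih =>
    by_cases hj : j < gs.length
    · have hdrop : gs.drop j = gs[j] :: gs.drop (j + 1) := List.drop_eq_getElem_cons hj
      by_cases hg : gs[j] = gi
      · have hcond : j < gs.length ∧ gs.getD j "" = gi :=
          ⟨hj, by rw [List.getD_eq_getElem _ _ hj]; exact hg⟩
        rw [pvInner, if_pos hcond, ih (j + 1) (by omega), hdrop]
        simp [List.takeWhile, hg]
        omega
      · have hcond : ¬(j < gs.length ∧ gs.getD j "" = gi) := by
          rintro ⟨_, h⟩; rw [List.getD_eq_getElem _ _ hj] at h; exact hg h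
        rw [pvInner, if_neg hcond, hdrop]
        simp [List.takeWhile, hg]
    · rw [pvInner, if_neg (by omega)]
      simp [List.drop_eq_nil_of_le (by omega : gs.length ≤ j)]

-- pair total of a maximal run followed by the rest
theorem pvPairScore_run (g : String) (r rest : List String) (hr : r ≠ [])
    (hall : ∀ x ∈ r, x = g) (hhead : ∀ y, rest.head? = some y → y ≠ g) :
    pvPairScore (r ++ rest)
      = (if g = "non-binary" then 0 else (r.length : Int) - 1) + pvPairScore rest := by
  induction r with
  | nil => exact absurd rfl hr
  | cons a t ih =>
    have ha : a = g := hall a (by simp)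
    subst ha
    cases t with
    | nil =>
      cases rest with
      | nil => simp [pvPairScore]
      | cons y ys =>
        have hy : y ≠ a := hhead y (by simp)
        have hcz : pvContrib a y = 0 := by
          unfold pvContrib
          split_ifs with h1 h2
          · rfl
          · exact absurd h2.symm hy
          · rfl
        simp only [List.cons_append, List.nil_append, pvPairScore, hcz]
        simp
    | cons b t' =>
      have hb : b = a := hall b (by simp)
      have ihh := ih (by simp) (fun x hx => hall x (by simp [hx]))
      rw [hb] at ihh ⊢
      have hstep : pvPairScore ((a :: a :: t') ++ rest)
          = pvContrib a a + pvPairScore ((a :: t') ++ rest) := rfl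
      rw [hstep, ihh]
      have hca : pvContrib a a = if a = "non-binary" then 0 else 1 := by
        simp [pvContrib]
      rw [hca]
      by_cases hnb : a = "non-binary"
      · simp [hnb]
      · simp only [if_neg hnb, List.length_cons]
        push_cast
        ring

-- outer while loop computes the adjacent-pair total of the remaining suffix (fuel adequate)
theorem pvOuter_spec (gs : List String) (fuel i : Nat) (score : Int)
    (hf : gs.length - i ≤ fuel) :
    pvOuter gs gs.length fuel i score = score + pvPairScore (gs.drop i) := by
  induction fuel generalizing i score with
  | zero =>
    have hi : gs.length ≤ i := by omega
    simp [pvOuter, List.drop_eq_nil_of_le hi, pvPairScore]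
  | succ fuel ih =>
    rw [pvOuter]
    by_cases hi : i < gs.length
    · rw [if_pos hi]
      have hgd : gs.getD i "" = gs[i] := List.getD_eq_getElem _ _ hi
      set g := gs[i] with hg
      have hdrop : gs.drop i = g :: gs.drop (i + 1) := List.drop_eq_getElem_cons hi
      set r := (gs.drop i).takeWhile (fun x => x = g) with hrdef
      set rest := (gs.drop i).dropWhile (fun x => x = g) with hrestdef
      have hsplit : r ++ rest = gs.drop i := List.takeWhile_append_dropWhile
      have hrne : r ≠ [] := by
        rw [hrdef, hdrop]
        simp [List.takeWhile]
      have hall : ∀ x ∈ r, x = g := by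
        intro x hx
        have := List.mem_takeWhile_imp hx
        simpa using this
      have hhead : ∀ y, rest.head? = some y → y ≠ g := by
        intro y hy
        have H := List.head?_dropWhile_not (fun x => decide (x = g)) (gs.drop i)
        rw [← hrestdef] at H
        rw [hy] at H
        simpa using H
      have hinner : pvInner gs gs.length (gs.getD i "") (gs.length - i) i = i + r.length := by
        rw [hgd, pvInner_spec gs g (gs.length - i) i (le_refl _)]
      have hjlen : i + r.length ≤ gs.length := by
        have h1 : r.length ≤ (gs.drop i).length := (List.takeWhile_sublist _).length_le
        simp at h1; omega
      have hrpos : 0 < r.length := List.length_pos_of_ne_nil hrne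
      have hdropj : gs.drop (i + r.length) = rest := by
        have : gs.drop (i + r.length) = (gs.drop i).drop r.length := by
          rw [List.drop_drop]
        rw [this, ← hsplit, List.drop_left]
      rw [hinner, ih (i + r.length) _ (by omega), hdropj]
      rw [← hsplit]
      rw [pvPairScore_run g r rest hrne hall hhead]
      rw [hgd]
      by_cases hnb : g = "non-binary"
      · rw [if_neg (not_not_intro hnb), if_pos hnb]
        ring
      · rw [if_pos hnb, if_neg hnb]
        push_cast
        ring
    · rw [if_neg hi]
      rw [List.drop_eq_nil_of_le (by omega)]
      simp [pvPairScore]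

-- both ports equal the adjacent-pair total
theorem pvA_eq (students : List String) (genders : List (String × String)) :
    seat_order_score students genders
      = pvPairScore (students.map (fun s => pvLookup genders s)) := by
  unfold seat_order_score
  have hmap :
      (PySem.List.pyRange 1 (PySem.List.len students) 1).foldl
        (fun score index =>
          let previous_gender := pvLookup genders (PySem.List.pyGetD students (index - 1) "")
          let current_gender := pvLookup genders (PySem.List.pyGetD students index "")
          if previous_gender = "non-binary" ∨ current_gender = "non-binary" then score
          else if previous_gender = current_gender then score + 1 else score) (0 : Int)
      = (PySem.List.pyRange 1 ((students.map (fun s => pvLookup genders s)).length : Int) 1).foldl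
        (fun score i =>
          let p := PySem.List.pyGetD (students.map (fun s => pvLookup genders s)) (i - 1) (pvLookup genders "")
          let c := PySem.List.pyGetD (students.map (fun s => pvLookup genders s)) i (pvLookup genders "")
          if p = "non-binary" ∨ c = "non-binary" then score
          else if p = c then score + 1 else score) (0 : Int) := by
    rw [PySem.List.len_eq, List.length_map]
    apply PySem.List.foldl_congr_mem
    intro acc i hi
    simp only [PySem.List.pyGetD_map]
  have h3 :
      (PySem.List.pyRange 1 ((students.map (fun s => pvLookup genders s)).length : Int) 1).foldl
        (fun score i =>
          let p := PySem.List.pyGetD (students.map (fun s => pvLookup genders s)) (i - 1) (pvLookup genders "")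
          let c := PySem.List.pyGetD (students.map (fun s => pvLookup genders s)) i (pvLookup genders "")
          if p = "non-binary" ∨ c = "non-binary" then score
          else if p = c then score + 1 else score) (0 : Int)
      = pvPairScore (students.map (fun s => pvLookup genders s)) := by
    rw [pvLoopA]
    ring
  exact hmap.trans h3

theorem pvB_eq (students : List String) (genders : List (String × String)) :
    seat_order_score_alt students genders
      = pvPairScore (students.map (fun s => pvLookup genders s)) := by
  unfold seat_order_score_alt
  by_cases h : PySem.List.len students < 2
  · rw [if_pos h]
    rw [PySem.List.len_eq] at h
    match students, h with
    | [], _ => simp [pvPairScore]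
    | [a], _ => simp [pvPairScore]
  · rw [if_neg h]
    rw [pvOuter_spec _ _ _ _ (by omega)]
    simp

-- ===== VERDICT (by name: the statement is the Claim_ definition above) =====
theorem seat_order_score_spec : Claim_equal_seat_order_score := by
  intro students genders _ _
  unfold Spec_seat_order_score
  rw [pvA_eq, pvB_eq]
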